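-- pv_equiv track=rewrite | github.com/AquariusGit/AnkiGenerator | src/anki_generator.py | _find_best_subtitle_match
-- ===== SOURCE A (Python) =====
-- def _find_best_subtitle_match(preferred_lang, available_subtitles):
--     """查找最佳字幕匹配项，优先完全匹配，其次是前缀匹配，优先SRT格式。"""
--     best_match_index = None
--     best_match_priority = 999 # 0 for exact, 1 for prefix, 2 for auto, 3 for other
--
--     for i, (lang_code, desc) in enumerate(available_subtitles):
--         current_priority = 999
--         is_auto = "(auto)" in desc.lower()
--         is_srt = "(srt)" in desc.lower()
--
--         # 优先完全匹配语言代码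
--         if lang_code.lower() == preferred_lang.lower():
--             current_priority = 0
--         # 其次是前缀匹配 (例如 'en' 匹配 'en-US')
--         elif lang_code.lower().startswith(preferred_lang.lower()):
--             current_priority = 1
--         # 再次是自动字幕
--         elif is_auto:
--             current_priority = 2
--         # 最后是其他字幕
--         else:
--             current_priority = 3
--
--         # 如果优先级相同，优先选择 SRT 格式
--         if current_priority < best_match_priority or \
--            (current_priority == best_match_priority and is_srt and not ("(srt)" in available_subtitles[best_match_index][1].lower() if best_match_index is not None else False)):
--             best_match_priority = current_priority
--             best_match_index = i
--
--     return best_match_index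
-- ===== SOURCE B (Python) =====
-- def _find_best_subtitle_match(preferred_lang, available_subtitles):
--     """Bucket indices by language-match priority (0 exact, 1 prefix, 2 auto, 3 other),
--     then pick from the best nonempty bucket: its first SRT entry if any, else its first entry."""
--     pl = preferred_lang.lower()
--     groups = [[], [], [], []]
--     for i, (lang_code, desc) in enumerate(available_subtitles):
--         l = lang_code.lower()
--         if l == pl:
--             p = 0
--         elif l.startswith(pl):
--             p = 1
--         elif "(auto)" in desc.lower():
--             p = 2
--         else:
--             p = 3
--         groups[p].append(i)
--     for g in groups:
--         if g:
--             for i in g: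
--                 if "(srt)" in available_subtitles[i][1].lower():
--                     return i
--             return g[0]
--     return None
-- ===== Notes on version B (the rewrite author's own statement) =====
-- stated objective: alternative
-- what changed: Replaces A's single best-so-far tracking loop (stored index + priority, re-lowercasing preferred_lang and re-indexing the list each iteration to re-test whether the current best is SRT) with a two-stage bucket algorithm: one pass partitions the indices into four priority buckets, then a second stage picks from the first nonempty bucket its first SRT entry, else its first entry.
import Mathlib
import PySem

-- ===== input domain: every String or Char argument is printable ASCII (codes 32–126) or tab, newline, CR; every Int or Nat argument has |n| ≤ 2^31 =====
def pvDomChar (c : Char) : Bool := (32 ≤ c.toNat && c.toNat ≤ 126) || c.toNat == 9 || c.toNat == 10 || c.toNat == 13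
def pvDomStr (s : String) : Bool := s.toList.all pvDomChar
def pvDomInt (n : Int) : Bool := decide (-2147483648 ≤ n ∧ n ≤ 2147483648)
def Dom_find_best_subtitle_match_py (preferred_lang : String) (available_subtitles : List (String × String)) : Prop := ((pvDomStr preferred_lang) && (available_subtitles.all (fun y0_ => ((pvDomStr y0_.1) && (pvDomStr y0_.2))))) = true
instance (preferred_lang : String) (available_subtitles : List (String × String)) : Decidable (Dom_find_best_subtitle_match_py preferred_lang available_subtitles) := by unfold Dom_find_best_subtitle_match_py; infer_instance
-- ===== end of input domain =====

-- B replaces A's single best-so-far tracking loop with a two-stage bucket algorithm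
-- (partition the indices into four priority buckets, then select from the best bucket):
-- an alternative decomposition of the same O(n) task.

-- ===== PORT A =====
-- the body of A's for-loop, as a fold step over the enumerated list
def pvStepA (preferred_lang : String) (available_subtitles : List (String × String))
    (st : Option Int × Int) (p : Int × (String × String)) : Option Int × Int :=
  let i := p.1
  let lang_code := p.2.1
  let desc := p.2.2
  let is_auto := PySem.Str.isIn "(auto)" (PySem.Str.lower desc)
  let is_srt := PySem.Str.isIn "(srt)" (PySem.Str.lower desc)
  let current_priority : Int :=
    if PySem.Str.lower lang_code == PySem.Str.lower preferred_lang then 0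
    else if PySem.Str.startswith (PySem.Str.lower lang_code) (PySem.Str.lower preferred_lang) then 1
    else if is_auto then 2
    else 3
  let bestSrt : Bool :=                      -- '"(srt)" in available_subtitles[best_match_index][1].lower() if best_match_index is not None else False'
    match st.1 with
    | none => false
    | some j =>
      match PySem.List.pyGet? available_subtitles j with
      | some q => PySem.Str.isIn "(srt)" (PySem.Str.lower q.2)
      | none => false                        -- unreachable: the stored best index is always in range
  if current_priority < st.2 || (current_priority == st.2 && is_srt && !bestSrt)
  then (some i, current_priority) else st

def find_best_subtitle_match_py (preferred_lang : String) (available_subtitles : List (String × String)) : Option Int :=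
  ((PySem.List.enumerate available_subtitles).foldl
    (pvStepA preferred_lang available_subtitles) ((none : Option Int), (999 : Int))).1

-- ===== PORT B =====
-- the priority computed in Source B's first loop
def pvPrioB (pl : String) (lang_code desc : String) : Int :=
  if PySem.Str.lower lang_code == pl then 0
  else if PySem.Str.startswith (PySem.Str.lower lang_code) pl then 1
  else if PySem.Str.isIn "(auto)" (PySem.Str.lower desc) then 2
  else 3

-- '"(srt)" in available_subtitles[i][1].lower()' from Source B's selection stage
def pvIsSrtAt (avail : List (String × String)) (i : Int) : Bool :=
  match PySem.List.pyGet? avail i with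
  | some q => PySem.Str.isIn "(srt)" (PySem.Str.lower q.2)
  | none => false

-- Source B's second stage: 'for g in groups: if g: (first SRT in g, else g[0])'
def pvPickGroup (avail : List (String × String)) : List (List Int) → Option Int
  | [] => none
  | g :: rest =>
    match g with
    | [] => pvPickGroup avail rest
    | first :: _ =>
      match g.find? (fun i => pvIsSrtAt avail i) with
      | some i => some i
      | none => some first

def find_best_subtitle_match_py_alt (preferred_lang : String) (available_subtitles : List (String × String)) : Option Int :=
  let pl := PySem.Str.lower preferred_lang
  let groups :=
    (PySem.List.enumerate available_subtitles).foldl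
      (fun (g : List Int × List Int × List Int × List Int) x =>
        let p := pvPrioB pl x.2.1 x.2.2
        if p = 0 then (g.1 ++ [x.1], g.2.1, g.2.2.1, g.2.2.2)
        else if p = 1 then (g.1, g.2.1 ++ [x.1], g.2.2.1, g.2.2.2)
        else if p = 2 then (g.1, g.2.1, g.2.2.1 ++ [x.1], g.2.2.2)
        else (g.1, g.2.1, g.2.2.1, g.2.2.2 ++ [x.1]))
      ([], [], [], [])
  pvPickGroup available_subtitles [groups.1, groups.2.1, groups.2.2.1, groups.2.2.2]

-- ===== PRECONDITION & SPEC =====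
def Spec_find_best_subtitle_match_py (preferred_lang : String) (available_subtitles : List (String × String)) (out : Option Int) : Prop := out = find_best_subtitle_match_py_alt preferred_lang available_subtitles
instance (preferred_lang : String) (available_subtitles : List (String × String)) (out : Option Int) : Decidable (Spec_find_best_subtitle_match_py preferred_lang available_subtitles out) := by unfold Spec_find_best_subtitle_match_py; infer_instance

-- ===== CLAIM (what is proved, stated in full; the proofs are below) =====
def Claim_equal_find_best_subtitle_match_py : Prop := ∀ (preferred_lang : String) (available_subtitles : List (String × String)), Dom_find_best_subtitle_match_py preferred_lang available_subtitles → Spec_find_best_subtitle_match_py preferred_lang available_subtitles (find_best_subtitle_match_py preferred_lang available_subtitles)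

-- ===== LEMMAS AND PROOFS =====

-- abstract view of one enumerated entry: (index, priority, is-srt)
def pvSrt (d : String) : Bool := PySem.Str.isIn "(srt)" (PySem.Str.lower d)

def pvAbs (pl : String) (x : Int × (String × String)) : Int × Int × Bool :=
  (x.1, pvPrioB pl x.2.1 x.2.2, pvSrt x.2.2)

-- reference semantics on the abstract list: minimal priority, then first SRT in that group, else first
def pvMinP : List (Int × Int × Bool) → Int
  | [] => 999
  | x :: t => min x.2.1 (pvMinP t)

def pvSelect (l : List (Int × Int × Bool)) : Option Int :=
  let c := l.filter (fun x => x.2.1 == pvMinP l)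
  match c.find? (fun x => x.2.2) with
  | some x => some x.1
  | none => c.head?.map (fun x => x.1)

-- A's loop after the first element, with the stored best summarised by (index, srt-flag, priority)
def pvRun : Int → Bool → Int → List (Int × Int × Bool) → Option Int
  | j, _, _, [] => some j
  | j, b, p, x :: t =>
    if x.2.1 < p then pvRun x.1 x.2.2 x.2.1 t
    else if x.2.1 = p ∧ x.2.2 = true ∧ b = false then pvRun x.1 true p t
    else pvRun j b p t

lemma pvPrioB_bounds (pl lang desc : String) : 0 ≤ pvPrioB pl lang desc ∧ pvPrioB pl lang desc ≤ 3 := by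
  unfold pvPrioB; split_ifs <;> norm_num

lemma pvLookup_enum (avail : List (String × String)) :
    ∀ x ∈ PySem.List.enumerate avail, PySem.List.pyGet? avail x.1 = some x.2 := by
  intro x hx
  rw [PySem.List.mem_enumerate_iff] at hx
  obtain ⟨k, hk, rfl⟩ := hx
  simp [hk]

-- ==== A-side: the fold equals pvRun on the abstract tail ====
lemma pvFoldA_run (preferred_lang : String) (avail : List (String × String)) :
    ∀ (t : List (Int × (String × String))) (j : Int) (dj : String × String) (p : Int),
      PySem.List.pyGet? avail j = some dj →
      (∀ x ∈ t, PySem.List.pyGet? avail x.1 = some x.2) →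
      (t.foldl (pvStepA preferred_lang avail) (some j, p)).1 =
        pvRun j (pvSrt dj.2) p (t.map (pvAbs (PySem.Str.lower preferred_lang))) := by
  intro t
  induction t with
  | nil => intro j dj p _ _; rfl
  | cons x t ih =>
    intro j dj p hj hl
    have hx : PySem.List.pyGet? avail x.1 = some x.2 := hl x List.mem_cons_self
    have hl' : ∀ y ∈ t, PySem.List.pyGet? avail y.1 = some y.2 :=
      fun y hy => hl y (List.mem_cons_of_mem _ hy)
    simp only [List.foldl_cons, List.map_cons]
    have hstep : pvStepA preferred_lang avail (some j, p) x =
        (if pvPrioB (PySem.Str.lower preferred_lang) x.2.1 x.2.2 < p ||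
            (pvPrioB (PySem.Str.lower preferred_lang) x.2.1 x.2.2 == p &&
             pvSrt x.2.2 && !pvSrt dj.2)
         then (some x.1, pvPrioB (PySem.Str.lower preferred_lang) x.2.1 x.2.2) else (some j, p)) := by
      simp [pvStepA, pvPrioB, pvSrt, hj]
    set px := pvPrioB (PySem.Str.lower preferred_lang) x.2.1 x.2.2 with hpx
    by_cases h1 : px < p
    · rw [hstep, if_pos (by simp [h1])]
      rw [ih x.1 x.2 px hx hl']
      simp [pvRun, pvAbs, ← hpx, h1]
    · by_cases h2 : px = p ∧ pvSrt x.2.2 = true ∧ pvSrt dj.2 = false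
      · rw [hstep, if_pos (by simp [h2.1, h2.2.1, h2.2.2])]
        rw [ih x.1 x.2 px hx hl']
        simp only [pvRun, pvAbs, ← hpx]
        rw [if_neg (by omega), if_pos ⟨h2.1, h2.2.1, h2.2.2⟩, h2.1, h2.2.1]
      · have hc : (px < p || (px == p && pvSrt x.2.2 && !pvSrt dj.2)) = false := by
          cases hs : pvSrt x.2.2 <;> cases hb : pvSrt dj.2 <;> simp_all
        rw [hstep, if_neg (by simp [hc])]
        rw [ih j dj p hj hl']
        simp only [pvRun, pvAbs, ← hpx]
        rw [if_neg h1, if_neg (by intro h; exact h2 ⟨h.1, h.2.1, h.2.2⟩)]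

-- ==== pvRun equals pvSelect with the summary prepended ====
lemma pvSelect_drop_head (j p : Int) (b : Bool) (y : Int × Int × Bool) (m : List (Int × Int × Bool))
    (h : y.2.1 < p) : pvSelect ((j, p, b) :: y :: m) = pvSelect (y :: m) := by
  have hm : pvMinP ((j, p, b) :: y :: m) = pvMinP (y :: m) := by
    simp only [pvMinP]; omega
  have hne : (p == pvMinP (y :: m)) = false := by
    have : pvMinP (y :: m) ≤ y.2.1 := by simp only [pvMinP]; omega
    simp; omega
  simp only [pvSelect, hm, List.filter_cons, hne]
  simp

lemma pvSelect_swap_srt (j p : Int) (xi : Int) (m : List (Int × Int × Bool)) :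
    pvSelect ((j, p, false) :: (xi, p, true) :: m) = pvSelect ((xi, p, true) :: m) := by
  have hm : pvMinP ((j, p, false) :: (xi, p, true) :: m) = pvMinP ((xi, p, true) :: m) := by
    simp only [pvMinP]; omega
  by_cases hq : p ≤ pvMinP m
  · have hM : pvMinP ((xi, p, true) :: m) = p := by simp only [pvMinP]; omega
    simp [pvSelect, hm, hM]
  · have hM : pvMinP ((xi, p, true) :: m) = pvMinP m := by simp only [pvMinP]; omega
    have hne : (p == pvMinP m) = false := by simp; omega
    simp [pvSelect, hm, hM, hne]

lemma pvSelect_drop_mid (j p yi yp : Int) (b ys : Bool) (m : List (Int × Int × Bool))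
    (h1 : p ≤ yp) (h2 : yp = p → (ys = false ∨ b = true)) :
    pvSelect ((j, p, b) :: (yi, yp, ys) :: m) = pvSelect ((j, p, b) :: m) := by
  by_cases hyp : yp = p
  · subst hyp
    rcases h2 rfl with h | h
    · subst h
      by_cases hq : yp ≤ pvMinP m
      · have hMw : pvMinP ((j, yp, b) :: (yi, yp, false) :: m) = yp := by
          simp only [pvMinP]; omega
        have hMr : pvMinP ((j, yp, b) :: m) = yp := by simp only [pvMinP]; omega
        cases b <;>
          simp [pvSelect, hMw, hMr]
      · have hMw : pvMinP ((j, yp, b) :: (yi, yp, false) :: m) = pvMinP m := by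
          simp only [pvMinP]; omega
        have hMr : pvMinP ((j, yp, b) :: m) = pvMinP m := by simp only [pvMinP]; omega
        have hne : (yp == pvMinP m) = false := by simp; omega
        simp [pvSelect, hMw, hMr, hne]
    · subst h
      by_cases hq : yp ≤ pvMinP m
      · have hMw : pvMinP ((j, yp, true) :: (yi, yp, ys) :: m) = yp := by
          simp only [pvMinP]; omega
        have hMr : pvMinP ((j, yp, true) :: m) = yp := by simp only [pvMinP]; omega
        simp [pvSelect, hMw, hMr]
      · have hMw : pvMinP ((j, yp, true) :: (yi, yp, ys) :: m) = pvMinP m := by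
          simp only [pvMinP]; omega
        have hMr : pvMinP ((j, yp, true) :: m) = pvMinP m := by simp only [pvMinP]; omega
        have hne : (yp == pvMinP m) = false := by simp; omega
        simp [pvSelect, hMw, hMr, hne]
  · have hgt : p < yp := by omega
    have hMw : pvMinP ((j, p, b) :: (yi, yp, ys) :: m) = pvMinP ((j, p, b) :: m) := by
      simp only [pvMinP]; omega
    have hMle : pvMinP ((j, p, b) :: m) ≤ p := by simp only [pvMinP]; omega
    have hney : (yp == pvMinP ((j, p, b) :: m)) = false := by simp; omega
    simp only [pvSelect, hMw, List.filter_cons, hney]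
    simp

lemma pvRun_select (m : List (Int × Int × Bool)) :
    ∀ (j : Int) (b : Bool) (p : Int), p ≤ 999 →
      pvRun j b p m = pvSelect ((j, p, b) :: m) := by
  induction m with
  | nil =>
    intro j b p hp
    have hM : pvMinP [(j, p, b)] = p := by simp only [pvMinP]; omega
    cases b <;> simp [pvRun, pvSelect, hM]
  | cons x m ih =>
    intro j b p hp
    by_cases h1 : x.2.1 < p
    · rw [pvSelect_drop_head j p b x m h1]
      obtain ⟨xi, xp, xs⟩ := x
      simp only at h1
      simp only [pvRun, if_pos h1]
      exact ih xi xs xp (by omega)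
    · by_cases h2 : x.2.1 = p ∧ x.2.2 = true ∧ b = false
      · obtain ⟨xi, xp, xs⟩ := x
        obtain ⟨e1, e2, e3⟩ := h2
        simp only at e1 e2 e3 h1
        subst e2; subst e3
        rw [e1] at h1 ⊢
        simp only [pvRun]
        rw [if_neg (by omega), if_pos (by simp)]
        rw [ih xi true p hp]
        exact (pvSelect_swap_srt j p xi m).symm
      · obtain ⟨xi, xp, xs⟩ := x
        simp only at h1 h2
        rw [pvSelect_drop_mid j p xi xp b xs m (by omega)
          (fun he => by
            by_cases hx : xs = true
            · right
              by_cases hbv : b = true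
              · exact hbv
              · exact absurd ⟨he, hx, by simpa using hbv⟩ h2
            · exact Or.inl (by simpa using hx))]
        simp only [pvRun, if_neg h1, if_neg h2]
        exact ih j b p hp

-- ==== B-side: the bucket fold builds the four filtered index lists ====
def pvIdxOf (pl : String) (q : Int) (l : List (Int × (String × String))) : List Int :=
  (l.filter (fun x => pvPrioB pl x.2.1 x.2.2 == q)).map (fun x => x.1)

lemma pvFoldB_groups (pl : String) :
    ∀ (l : List (Int × (String × String))) (a0 a1 a2 a3 : List Int),
      l.foldl
        (fun (g : List Int × List Int × List Int × List Int) x =>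
          let p := pvPrioB pl x.2.1 x.2.2
          if p = 0 then (g.1 ++ [x.1], g.2.1, g.2.2.1, g.2.2.2)
          else if p = 1 then (g.1, g.2.1 ++ [x.1], g.2.2.1, g.2.2.2)
          else if p = 2 then (g.1, g.2.1, g.2.2.1 ++ [x.1], g.2.2.2)
          else (g.1, g.2.1, g.2.2.1, g.2.2.2 ++ [x.1]))
        (a0, a1, a2, a3) =
      (a0 ++ pvIdxOf pl 0 l, a1 ++ pvIdxOf pl 1 l, a2 ++ pvIdxOf pl 2 l, a3 ++ pvIdxOf pl 3 l) := by
  intro l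
  induction l with
  | nil => intro a0 a1 a2 a3; simp [pvIdxOf]
  | cons x t ih =>
    intro a0 a1 a2 a3
    have hb := pvPrioB_bounds pl x.2.1 x.2.2
    simp only [List.foldl_cons]
    by_cases h0 : pvPrioB pl x.2.1 x.2.2 = 0
    · simp only [h0]; rw [ih]
      simp [pvIdxOf, h0]
    · by_cases h1 : pvPrioB pl x.2.1 x.2.2 = 1
      · simp only [h1]; rw [ih]
        simp [pvIdxOf, h1]
      · by_cases h2 : pvPrioB pl x.2.1 x.2.2 = 2
        · simp only [h2]; rw [ih]
          simp [pvIdxOf, h2]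
        · have h3 : pvPrioB pl x.2.1 x.2.2 = 3 := by omega
          simp only [h3]; rw [ih]
          simp [pvIdxOf, h3]

-- picking from one candidate group through index lookups = picking on the abstract group
lemma pvPickOne (avail : List (String × String)) (c : List (Int × Int × Bool))
    (hc : ∀ y ∈ c, pvIsSrtAt avail y.1 = y.2.2) :
    (match c.map (fun (x : Int × Int × Bool) => x.1) with
     | [] => (none : Option Int)
     | first :: _ =>
       match (c.map (fun (x : Int × Int × Bool) => x.1)).find? (fun i => pvIsSrtAt avail i) with
       | some i => some i
       | none => some first) =
    (match c.find? (fun (x : Int × Int × Bool) => x.2.2) with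
     | some x => some x.1
     | none => c.head?.map (fun (x : Int × Int × Bool) => x.1)) := by
  induction c with
  | nil => rfl
  | cons y c ih =>
    have hy := hc y List.mem_cons_self
    have hc' : ∀ z ∈ c, pvIsSrtAt avail z.1 = z.2.2 := fun z hz => hc z (List.mem_cons_of_mem _ hz)
    have ihx := ih hc'
    cases hs : y.2.2 with
    | true => simp [hy, hs]
    | false =>
      simp only [List.map_cons, List.find?_cons, hy, hs, List.head?_cons]
      cases hfc : c.find? (fun x : Int × Int × Bool => x.2.2) with
      | none =>
        have hfm : (c.map (fun x : Int × Int × Bool => x.1)).find? (fun i => pvIsSrtAt avail i) = none := by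
          rw [List.find?_eq_none] at hfc ⊢
          intro i hi
          obtain ⟨z, hz, rfl⟩ := List.mem_map.mp hi
          rw [hc' z hz]
          simpa using hfc z hz
        rw [hfm]
        simp
      | some z =>
        have hz := List.mem_of_find?_eq_some hfc
        have hfm : (c.map (fun x : Int × Int × Bool => x.1)).find? (fun i => pvIsSrtAt avail i) = some z.1 := by
          cases hmm : c.map (fun x : Int × Int × Bool => x.1) with
          | nil =>
            exact absurd (List.mem_map_of_mem (f := fun x : Int × Int × Bool => x.1) hz)
              (by simp [hmm])
          | cons f r =>
            have h2 := ihx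
            rw [hfc, hmm] at h2
            cases hm : (f :: r).find? (fun i => pvIsSrtAt avail i) with
            | none =>
              exfalso
              rw [List.find?_eq_none] at hm
              have hz1 : z.1 ∈ f :: r := by
                rw [← hmm]; exact List.mem_map_of_mem hz
              have hcz := hm z.1 hz1
              rw [hc' z hz] at hcz
              simp [List.find?_some hfc] at hcz
            | some i =>
              rw [hm] at h2
              simpa using h2
        rw [hfm]

-- every abstract element of the enumerated list reports its srt flag through lookup
lemma pvAbs_srt (avail : List (String × String)) (pl : String) :
    ∀ y ∈ (PySem.List.enumerate avail).map (pvAbs pl), pvIsSrtAt avail y.1 = y.2.2 := by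
  intro y hy
  obtain ⟨x, hx, rfl⟩ := List.mem_map.mp hy
  have := pvLookup_enum avail x hx
  simp [pvIsSrtAt, pvAbs, this, pvSrt]

-- filtered-and-projected index lists agree with the abstract candidate groups
lemma pvIdxOf_abs (pl : String) (q : Int) (l : List (Int × (String × String))) :
    pvIdxOf pl q l = ((l.map (pvAbs pl)).filter (fun y => y.2.1 == q)).map (fun y => y.1) := by
  induction l with
  | nil => rfl
  | cons x t ih =>
    simp only [pvIdxOf, List.filter_cons, List.map_cons] at *
    by_cases h : (pvPrioB pl x.2.1 x.2.2 == q) = true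
    · simp [pvAbs, h, ih]
    · simp only [Bool.not_eq_true] at h
      simp [pvAbs, h, ih]

lemma pvMinP_le (L : List (Int × Int × Bool)) : ∀ y ∈ L, pvMinP L ≤ y.2.1 := by
  induction L with
  | nil => intro y hy; cases hy
  | cons x t ih =>
    intro y hy
    rcases List.mem_cons.mp hy with rfl | hy
    · simp only [pvMinP]; omega
    · have := ih y hy; simp only [pvMinP]; omega

lemma pvMinP_attained (L : List (Int × Int × Bool)) (hb : ∀ y ∈ L, y.2.1 ≤ 3) (hne : L ≠ []) :
    ∃ y ∈ L, y.2.1 = pvMinP L := by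
  induction L with
  | nil => exact absurd rfl hne
  | cons x t ih =>
    by_cases ht : t = []
    · subst ht
      refine ⟨x, List.mem_cons_self, ?_⟩
      have := hb x List.mem_cons_self
      simp only [pvMinP]; omega
    · obtain ⟨y, hy, hyv⟩ := ih (fun z hz => hb z (List.mem_cons_of_mem _ hz)) ht
      by_cases hc : x.2.1 ≤ pvMinP t
      · exact ⟨x, List.mem_cons_self, by simp only [pvMinP]; omega⟩
      · exact ⟨y, List.mem_cons_of_mem _ hy, by simp only [pvMinP]; omega⟩

-- B's whole computation equals pvSelect on the abstract list
lemma pvAlt_select (preferred_lang : String) (avail : List (String × String)) :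
    find_best_subtitle_match_py_alt preferred_lang avail =
      pvSelect ((PySem.List.enumerate avail).map (pvAbs (PySem.Str.lower preferred_lang))) := by
  set pl := PySem.Str.lower preferred_lang with hpl
  set L := (PySem.List.enumerate avail).map (pvAbs pl) with hL
  unfold find_best_subtitle_match_py_alt
  simp only []
  rw [pvFoldB_groups pl (PySem.List.enumerate avail) [] [] [] []]
  simp only [List.nil_append]
  have hG : ∀ q : Int, pvIdxOf pl q (PySem.List.enumerate avail) =
      (L.filter (fun y => y.2.1 == q)).map (fun y => y.1) := fun q => pvIdxOf_abs pl q _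
  have hsrtL : ∀ y ∈ L, pvIsSrtAt avail y.1 = y.2.2 := pvAbs_srt avail pl
  by_cases hemp : L = []
  · have he : PySem.List.enumerate avail = [] := by
      cases h : PySem.List.enumerate avail with
      | nil => rfl
      | cons a t => rw [hL, h] at hemp; simp at hemp
    simp [pvPickGroup, hG, hemp, pvSelect]
  · have hbnd : ∀ y ∈ L, y.2.1 ≤ 3 := by
      intro y hy
      obtain ⟨x, _, rfl⟩ := List.mem_map.mp hy
      exact (pvPrioB_bounds pl x.2.1 x.2.2).2
    have hbnd0 : ∀ y ∈ L, 0 ≤ y.2.1 := by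
      intro y hy
      obtain ⟨x, _, rfl⟩ := List.mem_map.mp hy
      exact (pvPrioB_bounds pl x.2.1 x.2.2).1
    obtain ⟨w, hw, hwv⟩ := pvMinP_attained L hbnd hemp
    set M := pvMinP L with hM
    have hM0 : 0 ≤ M := by rw [← hwv]; exact hbnd0 w hw
    have hM3 : M ≤ 3 := by rw [← hwv]; exact hbnd w hw
    -- candidate group
    set c := L.filter (fun y => y.2.1 == M) with hc
    have hcne : c ≠ [] := by
      intro h
      have : w ∈ c := List.mem_filter.mpr ⟨hw, by simp [hwv]⟩
      rw [h] at this; cases this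
    have hcsrt : ∀ y ∈ c, pvIsSrtAt avail y.1 = y.2.2 :=
      fun y hy => hsrtL y (List.mem_filter.mp hy).1
    have hempty_lt : ∀ q : Int, q < M → L.filter (fun y => y.2.1 == q) = [] := by
      intro q hq
      rw [List.filter_eq_nil_iff]
      intro y hy
      have := pvMinP_le L y hy
      simp; omega
    -- the selection on the winning group
    have hpick : (match c.map (fun x => x.1) with
        | [] => (none : Option Int)
        | first :: _ =>
          match (c.map (fun x => x.1)).find? (fun i => pvIsSrtAt avail i) with
          | some i => some i
          | none => some first) = pvSelect L := by
      rw [pvPickOne avail c hcsrt]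
      simp only [pvSelect, ← hM, ← hc]
    have hpickGroup : ∀ first rest, c.map (fun x : Int × Int × Bool => x.1) = first :: rest →
        (match (first :: rest).find? (fun i => pvIsSrtAt avail i) with
          | some i => some i
          | none => some first) = pvSelect L := by
      intro first rest hfr
      rw [← hpick, hfr]
    -- now case on M ∈ {0,1,2,3}
    have hcmap_ne : c.map (fun x => x.1) ≠ [] := by
      intro h; exact hcne (by simpa using h)
    interval_cases M
    all_goals simp only [pvPickGroup, hG]
    · -- M = 0
      cases hmm : c.map (fun x => x.1) with
      | nil => exact absurd hmm hcmap_ne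
      | cons f r =>
        rw [hc] at hmm
        simp only [hmm]
        rw [← hc] at hmm
        exact hpickGroup f r hmm
    · -- M = 1
      rw [hempty_lt 0 (by omega)]
      cases hmm : c.map (fun x => x.1) with
      | nil => exact absurd hmm hcmap_ne
      | cons f r =>
        rw [hc] at hmm
        simp only [List.map_nil, hmm]
        rw [← hc] at hmm
        exact hpickGroup f r hmm
    · -- M = 2
      rw [hempty_lt 0 (by omega), hempty_lt 1 (by omega)]
      cases hmm : c.map (fun x => x.1) with
      | nil => exact absurd hmm hcmap_ne
      | cons f r =>
        rw [hc] at hmm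
        simp only [List.map_nil, hmm]
        rw [← hc] at hmm
        exact hpickGroup f r hmm
    · -- M = 3
      rw [hempty_lt 0 (by omega), hempty_lt 1 (by omega), hempty_lt 2 (by omega)]
      cases hmm : c.map (fun x => x.1) with
      | nil => exact absurd hmm hcmap_ne
      | cons f r =>
        rw [hc] at hmm
        simp only [List.map_nil, hmm]
        rw [← hc] at hmm
        exact hpickGroup f r hmm

-- ===== VERDICT (by name: the statement is the Claim_ definition above) =====
theorem find_best_subtitle_match_py_spec : Claim_equal_find_best_subtitle_match_py := by
  intro preferred_lang avail _
  unfold Spec_find_best_subtitle_match_py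
  rw [pvAlt_select]
  cases avail with
  | nil => rfl
  | cons a t =>
    unfold find_best_subtitle_match_py
    rw [PySem.List.enumerate_cons]
    simp only [List.foldl_cons, zero_add]
    have h0 : PySem.List.pyGet? (a :: t) (0 : Int) = some a := by simp
    have hstep0 : pvStepA preferred_lang (a :: t) ((none : Option Int), (999 : Int)) (0, a) =
        (some 0, pvPrioB (PySem.Str.lower preferred_lang) a.1 a.2) := by
      have hb := pvPrioB_bounds (PySem.Str.lower preferred_lang) a.1 a.2
      simp only [pvStepA, pvPrioB] at *
      rw [if_pos (by split_ifs <;> simp)]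
    rw [hstep0]
    have hl : ∀ x ∈ PySem.List.enumerate t 1, PySem.List.pyGet? (a :: t) x.1 = some x.2 := by
      intro x hx
      rw [PySem.List.mem_enumerate_iff] at hx
      obtain ⟨k, hk, rfl⟩ := hx
      have : ((1 : Int) + k) = ((k + 1 : Nat) : Int) := by push_cast; ring
      rw [this, PySem.List.pyGet?_natCast]
      simp [hk]
    rw [pvFoldA_run preferred_lang (a :: t) (PySem.List.enumerate t 1) 0 a
      (pvPrioB (PySem.Str.lower preferred_lang) a.1 a.2) h0 hl]
    rw [pvRun_select _ _ _ _ (by have := pvPrioB_bounds (PySem.Str.lower preferred_lang) a.1 a.2; omega)]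
    congr 1
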